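-- pv_equiv track=rewrite | github.com/ohhalim/llm_fIstudio_mcp_rag_midi_Improvisation_program | controller.py | get_chord_details
-- ===== SOURCE A (Python) =====
-- def get_chord_details(chord_notes):
--     """
--     코드 노트를 분석하여 루트 노트와 코드 타입(Major/Minor)을 반환합니다.
--     """
--     if not chord_notes:
--         return None, None
--
--     # 노트를 정렬하여 루트를 찾기 쉽게 만듭니다.
--     sorted_notes = sorted(list(set(chord_notes)))
--     root_note = sorted_notes[0]
--
--     # 3화음의 간격(interval)을 분석합니다.
--     intervals = [note - root_note for note in sorted_notes]
--
--     # Major chord: Root, Major Third (4), Perfect Fifth (7)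
--     if 4 in intervals and 7 in intervals:
--         return root_note, 'Major'
--     # Minor chord: Root, Minor Third (3), Perfect Fifth (7)
--     if 3 in intervals and 7 in intervals:
--         return root_note, 'Minor'
--
--     return root_note, 'Unknown' # 다른 종류의 코드는 일단 'Unknown'으로 처리
-- ===== SOURCE B (Python) =====
-- def get_chord_details(chord_notes):
--     """
--     Streaming classification: one explicit loop finds the root (running
--     minimum), a second loop flags the intervals 3/4/7 as they fly by.
--     No set, no sort, no intervals list is ever materialized.
--     """
--     root = None
--     for n in chord_notes:
--         if root is None or n < root:
--             root = n
--     if root is None: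
--         return None, None
--
--     has3 = has4 = has7 = False
--     for n in chord_notes:
--         d = n - root
--         if d == 3:
--             has3 = True
--         elif d == 4:
--             has4 = True
--         elif d == 7:
--             has7 = True
--
--     if has7 and has4:
--         return root, 'Major'
--     if has7 and has3:
--         return root, 'Minor'
--     return root, 'Unknown'
-- ===== Notes on version B (the rewrite author's own statement) =====
-- stated objective: alternative
-- what changed: B replaces sort-the-deduplicated-set-and-scan-an-intervals-list by a streaming two-pass fold: a running-minimum loop finds the root and a second loop over the raw list sets three boolean flags for intervals 3/4/7, classifying from the flags; no set, sort or intervals list is built.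
import Mathlib
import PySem

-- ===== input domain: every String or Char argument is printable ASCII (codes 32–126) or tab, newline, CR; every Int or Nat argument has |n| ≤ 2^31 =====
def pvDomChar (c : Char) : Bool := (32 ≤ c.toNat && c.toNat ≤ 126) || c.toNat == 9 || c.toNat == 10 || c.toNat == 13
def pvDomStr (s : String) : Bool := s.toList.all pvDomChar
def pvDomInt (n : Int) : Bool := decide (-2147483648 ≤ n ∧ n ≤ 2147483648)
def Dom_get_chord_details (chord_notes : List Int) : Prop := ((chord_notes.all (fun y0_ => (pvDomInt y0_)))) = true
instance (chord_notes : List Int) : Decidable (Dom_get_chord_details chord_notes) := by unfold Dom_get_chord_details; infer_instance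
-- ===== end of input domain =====

-- B replaces sort+dedup+intervals list by a streaming two-pass fold (running minimum, then interval flags); alternative decomposition, no speed claim.

-- ===== PORT A =====
def get_chord_details (chord_notes : List Int) : Option Int × Option String :=
  if chord_notes = [] then (none, none)
  else
    let sorted_notes := PySem.List.sorted (PySem.Set.ofList chord_notes) (fun x => x) false
    -- sorted_notes[0]: sorted_notes is nonempty because chord_notes ≠ [], so headD is exact
    let root_note := sorted_notes.headD 0
    let intervals := sorted_notes.map (fun note => note - root_note)
    if intervals.contains 4 && intervals.contains 7 then (some root_note, some "Major")
    else if intervals.contains 3 && intervals.contains 7 then (some root_note, some "Minor")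
    else (some root_note, some "Unknown")

-- ===== PORT B =====
-- first loop of Source B: running minimum, root starts as None
def pvRunMin (chord_notes : List Int) : Option Int :=
  chord_notes.foldl
    (fun acc n => match acc with
      | none => some n
      | some r => if n < r then some n else some r) none

-- second loop of Source B: flag the intervals 3 / 4 / 7 (has3, has4, has7)
def pvFlagStep (root : Int) (f : Bool × Bool × Bool) (n : Int) : Bool × Bool × Bool :=
  let d := n - root
  if d = 3 then (true, f.2.1, f.2.2)
  else if d = 4 then (f.1, true, f.2.2)
  else if d = 7 then (f.1, f.2.1, true)
  else f

def get_chord_details_alt (chord_notes : List Int) : Option Int × Option String :=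
  match pvRunMin chord_notes with
  | none => (none, none)
  | some root =>
    let flags := chord_notes.foldl (pvFlagStep root) (false, false, false)
    if flags.2.2 && flags.2.1 then (some root, some "Major")
    else if flags.2.2 && flags.1 then (some root, some "Minor")
    else (some root, some "Unknown")

-- ===== PRECONDITION & SPEC =====
def Spec_get_chord_details (chord_notes : List Int) (out : Option Int × Option String) : Prop := out = get_chord_details_alt chord_notes
instance (chord_notes : List Int) (out : Option Int × Option String) : Decidable (Spec_get_chord_details chord_notes out) := by unfold Spec_get_chord_details; infer_instance

-- ===== CLAIM (what is proved, stated in full; the proofs are below) =====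
def Claim_equal_get_chord_details : Prop := ∀ (chord_notes : List Int), Dom_get_chord_details chord_notes → Spec_get_chord_details chord_notes (get_chord_details chord_notes)

-- ===== LEMMAS AND PROOFS =====

-- characterisation of the running-minimum fold with a `some` accumulator
theorem runMin_some (xs : List Int) (r : Int) :
    ∃ m, xs.foldl (fun acc n => match acc with
          | none => some n
          | some r => if n < r then some n else some r) (some r) = some m ∧
        (m = r ∨ m ∈ xs) ∧ m ≤ r ∧ ∀ a ∈ xs, m ≤ a := by
  induction xs generalizing r with
  | nil => exact ⟨r, rfl, Or.inl rfl, le_refl r, by simp⟩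
  | cons x xs ih =>
    simp only [List.foldl_cons]
    by_cases h : x < r
    · obtain ⟨m, h1, h2, h3, h4⟩ := ih x
      refine ⟨m, by simpa [h] using h1, ?_, le_of_lt (lt_of_le_of_lt h3 h), ?_⟩
      · rcases h2 with h2 | h2
        · exact Or.inr (by simp [h2])
        · exact Or.inr (List.mem_cons_of_mem _ h2)
      · intro a ha
        rcases List.mem_cons.mp ha with rfl | ha
        · exact h3
        · exact h4 a ha
    · obtain ⟨m, h1, h2, h3, h4⟩ := ih r
      refine ⟨m, by simpa [h] using h1, ?_, h3, ?_⟩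
      · rcases h2 with h2 | h2
        · exact Or.inl h2
        · exact Or.inr (List.mem_cons_of_mem _ h2)
      · intro a ha
        rcases List.mem_cons.mp ha with rfl | ha
        · exact le_trans h3 (not_lt.mp h)
        · exact h4 a ha

theorem runMin_char (xs : List Int) (hxs : xs ≠ []) :
    ∃ m, pvRunMin xs = some m ∧ m ∈ xs ∧ ∀ a ∈ xs, m ≤ a := by
  cases xs with
  | nil => exact absurd rfl hxs
  | cons x xs =>
    obtain ⟨m, h1, h2, h3, h4⟩ := runMin_some xs x
    refine ⟨m, by simpa [pvRunMin] using h1, ?_, ?_⟩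
    · rcases h2 with h2 | h2
      · simp [h2]
      · exact List.mem_cons_of_mem _ h2
    · intro a ha
      rcases List.mem_cons.mp ha with rfl | ha
      · exact h3
      · exact h4 a ha

-- RunMin on a nonempty list equals the head of sorted(set(xs))
theorem head_sorted_eq_runMin (xs : List Int) (m : Int)
    (hm : m ∈ xs) (hmin : ∀ a ∈ xs, m ≤ a) :
    (PySem.List.sorted (PySem.Set.ofList xs) (fun x => x) false).headD 0 = m := by
  have hsne : PySem.List.sorted (PySem.Set.ofList xs) (fun x => x) false ≠ [] := by
    intro h
    have : m ∈ PySem.Set.ofList xs := (PySem.Set.mem_ofList xs m).mpr hm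
    rw [(PySem.List.sorted_eq_nil_iff _ _ _).mp h] at this
    simp at this
  obtain ⟨h, t, hht⟩ := List.exists_cons_of_ne_nil hsne
  have hhead := PySem.List.key_head_sorted_le _ _ hht
  have hh_mem : h ∈ xs := by
    have : h ∈ PySem.List.sorted (PySem.Set.ofList xs) (fun x => x) false := by
      rw [hht]; exact List.mem_cons_self
    exact (PySem.Set.mem_ofList xs h).mp ((PySem.List.mem_sorted _ _ _ _).mp this)
  rw [hht]
  simp only [List.headD_cons]
  exact le_antisymm (hhead m ((PySem.Set.mem_ofList xs m).mpr hm)) (hmin h hh_mem)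

-- interval membership in A: (k ∈ intervals) ↔ any note at root + k
theorem interval_mem (xs : List Int) (root k : Int) :
    ((PySem.List.sorted (PySem.Set.ofList xs) (fun x => x) false).map
        (fun note => note - root)).contains k
      = xs.any (fun n => n - root == k) := by
  rw [Bool.eq_iff_iff, List.contains_iff_mem, List.any_eq_true]
  simp only [List.mem_map, PySem.List.mem_sorted, PySem.Set.mem_ofList, beq_iff_eq]

-- the flag fold computes three `any` tests
theorem flags_fold (xs : List Int) (root : Int) (f : Bool × Bool × Bool) :
    xs.foldl (pvFlagStep root) f =
      (f.1 || xs.any (fun n => n - root == 3),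
       f.2.1 || xs.any (fun n => n - root == 4),
       f.2.2 || xs.any (fun n => n - root == 7)) := by
  induction xs generalizing f with
  | nil => simp
  | cons x xs ih =>
    simp only [List.foldl_cons, List.any_cons, ih]
    by_cases h3 : x - root = 3
    · simp [pvFlagStep, h3]
    · by_cases h4 : x - root = 4
      · simp [pvFlagStep, h4]
      · by_cases h7 : x - root = 7
        · simp [pvFlagStep, h7]
        · simp only [pvFlagStep, if_neg h3, if_neg h4, if_neg h7,
            beq_eq_false_iff_ne.mpr h3, beq_eq_false_iff_ne.mpr h4,
            beq_eq_false_iff_ne.mpr h7, Bool.false_or]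

-- ===== VERDICT (by name: the statement is the Claim_ definition above) =====
theorem get_chord_details_spec : Claim_equal_get_chord_details := by
  intro xs _
  unfold Spec_get_chord_details get_chord_details get_chord_details_alt
  by_cases hxs : xs = []
  · simp [hxs, pvRunMin]
  · obtain ⟨m, hminv, hmem, hmin⟩ := runMin_char xs hxs
    simp only [hminv, if_neg hxs, head_sorted_eq_runMin xs m hmem hmin,
      interval_mem, flags_fold, Bool.false_or]
    rw [Bool.and_comm (xs.any fun n => n - m == 4) (xs.any fun n => n - m == 7),
        Bool.and_comm (xs.any fun n => n - m == 3) (xs.any fun n => n - m == 7)]
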